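-- pv_equiv track=rewrite | github.com/EldanGS/bversatile | Problems/companies/Facebook/Graph_Valid_Tree.py | is_valid_tree
-- ===== SOURCE A (Python) =====
-- import collections
--
-- def dfs(u, visited, graph):
--     if u in visited:
--         return
--
--     visited.add(u)
--     for v in graph[u]:
--         if v not in visited:
--             dfs(v, visited, graph)
--
-- def is_valid_tree(n, edges) -> bool:
--     if len(edges) != n - 1:
--         return False
--
--     graph = collections.defaultdict(list)
--     for u, v in edges:
--         graph[u].append(v)
--         graph[v].append(u)
--
--     visited = set()
--
--     dfs(0, visited, graph)
--
--     return len(visited) == n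
-- ===== SOURCE B (Python) =====
-- def is_valid_tree(n, edges) -> bool:
--     if len(edges) != n - 1:
--         return False
--
--     comp = {0}
--     prev = 0
--     while len(comp) > prev:
--         prev = len(comp)
--         for u, v in edges:
--             if u in comp:
--                 comp.add(v)
--             elif v in comp:
--                 comp.add(u)
--
--     return len(comp) == n
-- ===== Notes on version B (the rewrite author's own statement) =====
-- stated objective: alternative
-- what changed: Replaces the adjacency-dict build plus recursive DFS with iterative label propagation over the raw edge list to a fixpoint: the component of node 0 is grown by repeated passes over the edges until its size stops increasing, with no graph structure and no recursion.
import Mathlib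
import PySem

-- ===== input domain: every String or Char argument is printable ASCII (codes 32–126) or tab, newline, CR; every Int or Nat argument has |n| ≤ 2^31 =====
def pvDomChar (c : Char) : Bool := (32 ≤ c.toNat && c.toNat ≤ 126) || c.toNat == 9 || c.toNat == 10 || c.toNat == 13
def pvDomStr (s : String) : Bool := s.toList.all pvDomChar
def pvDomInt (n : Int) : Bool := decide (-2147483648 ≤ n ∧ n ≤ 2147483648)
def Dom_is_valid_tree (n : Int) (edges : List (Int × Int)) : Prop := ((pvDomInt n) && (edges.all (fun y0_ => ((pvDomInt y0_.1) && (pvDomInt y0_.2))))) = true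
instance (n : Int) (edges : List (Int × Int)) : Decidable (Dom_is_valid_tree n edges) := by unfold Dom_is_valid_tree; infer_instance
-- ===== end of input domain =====

-- B replaces the adjacency-dict build + recursive DFS of A with iterative label
-- propagation over the raw edge list to a fixpoint (objective: alternative, not faster).

-- ===== PORT A =====
-- graph[u].append(v); graph[v].append(u) on a defaultdict(list)
def dfsGraphStep (g : PySem.Dict Int (List Int)) (e : Int × Int) : PySem.Dict Int (List Int) :=
  (g.modify e.1 [] (· ++ [e.2])).modify e.2 [] (· ++ [e.1])

def buildGraph (edges : List (Int × Int)) : PySem.Dict Int (List Int) :=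
  edges.foldl dfsGraphStep PySem.Dict.empty

-- recursive dfs of A; the Nat argument is a fuel guard only (the fuel passed below
-- is proved sufficient, so the 0-branch is never reached on the call made by the port)
mutual
  def dfsF : Nat → Int → PySem.Set Int → PySem.Dict Int (List Int) → PySem.Set Int
    | 0, _, vis, _ => vis
    | f+1, u, vis, g =>
      if PySem.Set.contains vis u then vis
      else dfsNbrs f (g.getD u []) (PySem.Set.add vis u) g
    termination_by f _ _ _ => (f, 0)
  def dfsNbrs : Nat → List Int → PySem.Set Int → PySem.Dict Int (List Int) → PySem.Set Int
    | _, [], vis, _ => vis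
    | f, v :: rest, vis, g =>
      dfsNbrs f rest (if PySem.Set.contains vis v then vis else dfsF f v vis g) g
    termination_by f l _ _ => (f, l.length + 1)
end

def is_valid_tree (n : Int) (edges : List (Int × Int)) : Bool :=
  if (edges.length : Int) ≠ n - 1 then false
  else
    let g := buildGraph edges
    let visited := dfsF (2 * edges.length + 2) 0 PySem.Set.empty g
    decide ((visited.length : Int) = n)

-- ===== PORT B =====
def propStep (comp : PySem.Set Int) (e : Int × Int) : PySem.Set Int :=
  if PySem.Set.contains comp e.1 then PySem.Set.add comp e.2
  else if PySem.Set.contains comp e.2 then PySem.Set.add comp e.1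
  else comp

def propPass (comp : PySem.Set Int) (edges : List (Int × Int)) : PySem.Set Int :=
  edges.foldl propStep comp

-- the while-loop of B; the Nat argument is a fuel guard only (the fuel passed below
-- is proved sufficient, so the 0-branch is never reached on the call made by the port)
def satLoop : Nat → PySem.Set Int → List (Int × Int) → PySem.Set Int
  | 0, comp, _ => comp
  | f+1, comp, edges =>
    let c' := propPass comp edges
    if comp.length < c'.length then satLoop f c' edges else c'

def is_valid_tree_alt (n : Int) (edges : List (Int × Int)) : Bool :=
  if (edges.length : Int) ≠ n - 1 then false
  else
    let comp := satLoop (2 * edges.length + 1) (PySem.Set.ofList [0]) edges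
    decide ((comp.length : Int) = n)

-- ===== PRECONDITION & SPEC =====
def Spec_is_valid_tree (n : Int) (edges : List (Int × Int)) (out : Bool) : Prop := out = is_valid_tree_alt n edges
instance (n : Int) (edges : List (Int × Int)) (out : Bool) : Decidable (Spec_is_valid_tree n edges out) := by unfold Spec_is_valid_tree; infer_instance

-- ===== CLAIM (what is proved, stated in full; the proofs are below) =====
def Claim_equal_is_valid_tree : Prop := ∀ (n : Int) (edges : List (Int × Int)), Dom_is_valid_tree n edges → Spec_is_valid_tree n edges (is_valid_tree n edges)

-- ===== LEMMAS AND PROOFS =====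

-- undirected adjacency and reachability along the given edge list
def AdjE (edges : List (Int × Int)) (a b : Int) : Prop := (a, b) ∈ edges ∨ (b, a) ∈ edges
def ReachE (edges : List (Int × Int)) (a b : Int) : Prop := Relation.ReflTransGen (AdjE edges) a b
-- all node labels either program can ever visit
def nodesOf (edges : List (Int × Int)) : PySem.Set Int :=
  PySem.Set.ofList (0 :: edges.flatMap (fun e => [e.1, e.2]))

theorem zero_mem_nodesOf (edges : List (Int × Int)) : (0 : Int) ∈ nodesOf edges := by
  simp [nodesOf, PySem.Set.mem_ofList]

theorem adjE_mem_nodesOf {edges : List (Int × Int)} {a b : Int} (h : AdjE edges a b) :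
    a ∈ nodesOf edges ∧ b ∈ nodesOf edges := by
  simp only [nodesOf, PySem.Set.mem_ofList, List.mem_cons, List.mem_flatMap]
  rcases h with h | h
  · exact ⟨Or.inr ⟨(a, b), h, by simp⟩, Or.inr ⟨(a, b), h, by simp⟩⟩
  · exact ⟨Or.inr ⟨(b, a), h, by simp⟩, Or.inr ⟨(b, a), h, by simp⟩⟩

theorem length_nodesOf_le (edges : List (Int × Int)) :
    (nodesOf edges).length ≤ 2 * edges.length + 1 := by
  have h := PySem.Set.length_ofList_le ((0 : Int) :: edges.flatMap (fun e => [e.1, e.2]))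
  have h2 : (edges.flatMap (fun e : Int × Int => [e.1, e.2])).length = 2 * edges.length := by
    induction edges with
    | nil => simp
    | cons e es ih => simp [List.flatMap_cons]; omega
  simp only [nodesOf]
  simp only [List.length_cons, h2] at h
  omega

theorem nodup_subset_length {l l' : List Int} (h : l.Nodup) (hs : ∀ x ∈ l, x ∈ l') :
    l.length ≤ l'.length := by
  calc l.length = l.toFinset.card := (List.toFinset_card_of_nodup h).symm
    _ ≤ l'.toFinset.card := Finset.card_le_card (fun x hx => by
        simp only [List.mem_toFinset] at *; exact hs x hx)
    _ ≤ l'.length := l'.toFinset_card_le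

theorem subset_of_nodup_le {l l' : List Int} (h : l.Nodup) (hs : ∀ x ∈ l, x ∈ l')
    (hl : l'.length ≤ l.length) : ∀ x ∈ l', x ∈ l := by
  have hsub : l.toFinset ⊆ l'.toFinset := fun x hx => by
    simp only [List.mem_toFinset] at *; exact hs x hx
  have hcard : l'.toFinset.card ≤ l.toFinset.card := by
    calc l'.toFinset.card ≤ l'.length := l'.toFinset_card_le
      _ ≤ l.length := hl
      _ = l.toFinset.card := (List.toFinset_card_of_nodup h).symm
  have heq := Finset.eq_of_subset_of_card_le hsub hcard
  intro x hx
  have : x ∈ l.toFinset := by rw [heq]; simp [hx]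
  simpa using this

theorem buildGraph_pairs (edges : List (Int × Int)) (d : PySem.Dict Int (List Int)) :
    edges.foldl dfsGraphStep d =
      (edges.flatMap (fun e => [(e.1, e.2), (e.2, e.1)])).foldl
        (fun d p => d.modify p.1 [] (· ++ [p.2])) d := by
  induction edges generalizing d with
  | nil => rfl
  | cons e es ih => simp only [List.foldl_cons, List.flatMap_cons, List.foldl_append]; exact ih _

theorem mem_buildGraph {edges : List (Int × Int)} {u x : Int} :
    x ∈ (buildGraph edges).getD u [] ↔ AdjE edges u x := by
  unfold buildGraph
  rw [buildGraph_pairs, PySem.Dict.getD_foldl_modify_append]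
  have hempty : (PySem.Dict.empty : PySem.Dict Int (List Int)).getD u [] = [] := rfl
  rw [hempty]
  simp only [List.nil_append, List.mem_map, List.mem_filter, List.mem_flatMap, AdjE]
  constructor
  · rintro ⟨p, ⟨⟨e, he, hp⟩, hfst⟩, rfl⟩
    simp only [List.mem_cons, List.not_mem_nil, or_false] at hp
    simp only [beq_iff_eq] at hfst
    rcases hp with rfl | rfl
    · left; simp only at hfst ⊢; rw [← hfst]; simpa using he
    · right; simp only at hfst ⊢; rw [← hfst]; simpa using he
  · rintro (h | h)
    · exact ⟨(u, x), ⟨⟨(u, x), h, by simp⟩, by simp⟩, rfl⟩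
    · exact ⟨(u, x), ⟨⟨(x, u), h, by simp⟩, by simp⟩, rfl⟩

-- the joint DFS invariant for A (soundness, completeness-closure, monotonicity, nodup)
theorem dfs_main (edges : List (Int × Int)) (f : Nat) :
    (∀ (u : Int) (vis : PySem.Set Int), vis.Nodup → (∀ x ∈ vis, x ∈ nodesOf edges) →
      u ∈ nodesOf edges → (nodesOf edges).length < f + vis.length →
      (∃ t, dfsF f u vis (buildGraph edges) = vis ++ t) ∧
      (dfsF f u vis (buildGraph edges)).Nodup ∧
      (∀ x ∈ dfsF f u vis (buildGraph edges), x ∈ nodesOf edges) ∧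
      u ∈ dfsF f u vis (buildGraph edges) ∧
      (∀ x ∈ dfsF f u vis (buildGraph edges), x ∈ vis ∨ ReachE edges u x) ∧
      (∀ x ∈ dfsF f u vis (buildGraph edges), x ∉ vis → ∀ y, AdjE edges x y →
        y ∈ dfsF f u vis (buildGraph edges)))
    ∧
    (∀ (l : List Int) (vis : PySem.Set Int), vis.Nodup → (∀ x ∈ vis, x ∈ nodesOf edges) →
      (∀ v ∈ l, v ∈ nodesOf edges) → (nodesOf edges).length < f + vis.length →
      (∃ t, dfsNbrs f l vis (buildGraph edges) = vis ++ t) ∧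
      (dfsNbrs f l vis (buildGraph edges)).Nodup ∧
      (∀ x ∈ dfsNbrs f l vis (buildGraph edges), x ∈ nodesOf edges) ∧
      (∀ v ∈ l, v ∈ dfsNbrs f l vis (buildGraph edges)) ∧
      (∀ x ∈ dfsNbrs f l vis (buildGraph edges), x ∈ vis ∨ ∃ v ∈ l, ReachE edges v x) ∧
      (∀ x ∈ dfsNbrs f l vis (buildGraph edges), x ∉ vis → ∀ y, AdjE edges x y →
        y ∈ dfsNbrs f l vis (buildGraph edges))) := by
  induction f with
  | zero =>
    constructor
    · intro u vis hnd hsub hu hlen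
      exfalso
      have := nodup_subset_length hnd hsub
      omega
    · intro l vis hnd hsub hl hlen
      exfalso
      have := nodup_subset_length hnd hsub
      omega
  | succ f ih =>
    obtain ⟨ihF, ihN⟩ := ih
    have hP : ∀ (u : Int) (vis : PySem.Set Int), vis.Nodup → (∀ x ∈ vis, x ∈ nodesOf edges) →
        u ∈ nodesOf edges → (nodesOf edges).length < (f + 1) + vis.length →
        (∃ t, dfsF (f + 1) u vis (buildGraph edges) = vis ++ t) ∧
        (dfsF (f + 1) u vis (buildGraph edges)).Nodup ∧
        (∀ x ∈ dfsF (f + 1) u vis (buildGraph edges), x ∈ nodesOf edges) ∧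
        u ∈ dfsF (f + 1) u vis (buildGraph edges) ∧
        (∀ x ∈ dfsF (f + 1) u vis (buildGraph edges), x ∈ vis ∨ ReachE edges u x) ∧
        (∀ x ∈ dfsF (f + 1) u vis (buildGraph edges), x ∉ vis → ∀ y, AdjE edges x y →
          y ∈ dfsF (f + 1) u vis (buildGraph edges)) := by
      intro u vis hnd hsub hu hlen
      by_cases hmem : u ∈ vis
      · have hrw : dfsF (f + 1) u vis (buildGraph edges) = vis := by
          simp only [dfsF, if_pos ((PySem.Set.contains_iff _ _).mpr hmem)]
        rw [hrw]
        exact ⟨⟨[], by simp⟩, hnd, hsub, hmem, fun x hx => Or.inl hx,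
          fun x hx hnv => absurd hx hnv⟩
      · have hrw : dfsF (f + 1) u vis (buildGraph edges) =
            dfsNbrs f ((buildGraph edges).getD u []) (PySem.Set.add vis u) (buildGraph edges) := by
          simp only [dfsF,
            if_neg (fun h => hmem ((PySem.Set.contains_iff _ _).mp h))]
        have hadd : PySem.Set.add vis u = vis ++ [u] := PySem.Set.add_of_not_mem hmem
        have hsub' : ∀ x ∈ PySem.Set.add vis u, x ∈ nodesOf edges := by
          intro x hx
          rcases (PySem.Set.mem_add _ _ _).mp hx with h | rfl
          · exact hsub x h
          · exact hu
        have hnbr : ∀ v ∈ (buildGraph edges).getD u [], v ∈ nodesOf edges := by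
          intro v hv
          exact (adjE_mem_nodesOf (mem_buildGraph.mp hv)).2
        have hlen' : (nodesOf edges).length < f + (PySem.Set.add vis u).length := by
          rw [hadd]; simp; omega
        obtain ⟨⟨t, ht⟩, hnd', hsub2, hall, hsound, hclosed⟩ :=
          ihN ((buildGraph edges).getD u []) (PySem.Set.add vis u)
            (PySem.Set.nodup_add _ _ hnd) hsub' hnbr hlen'
        rw [hrw]
        refine ⟨⟨u :: t, by rw [ht, hadd]; simp⟩, hnd', hsub2, ?_, ?_, ?_⟩
        · rw [ht]
          exact List.mem_append_left _ (by rw [hadd]; simp)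
        · intro x hx
          rcases hsound x hx with hxv | ⟨v, hv, hvr⟩
          · rcases (PySem.Set.mem_add _ _ _).mp hxv with h | rfl
            · exact Or.inl h
            · exact Or.inr Relation.ReflTransGen.refl
          · exact Or.inr (Relation.ReflTransGen.head (mem_buildGraph.mp hv) hvr)
        · intro x hx hxnv y hy
          by_cases hxu : x = u
          · subst hxu
            exact hall y (mem_buildGraph.mpr hy)
          · have hxnv' : x ∉ PySem.Set.add vis u := by
              rw [PySem.Set.mem_add]
              rintro (h | h)
              · exact hxnv h
              · exact hxu h
            exact hclosed x hx hxnv' y hy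
    refine ⟨hP, ?_⟩
    intro l
    induction l with
    | nil =>
      intro vis hnd hsub _hl hlen
      have hrw : dfsNbrs (f + 1) [] vis (buildGraph edges) = vis := by
        simp only [dfsNbrs]
      rw [hrw]
      exact ⟨⟨[], by simp⟩, hnd, hsub, by simp, fun x hx => Or.inl hx,
        fun x hx hnv => absurd hx hnv⟩
    | cons v rest ihl =>
      intro vis hnd hsub hl hlen
      set r1 := if PySem.Set.contains vis v then vis
        else dfsF (f + 1) v vis (buildGraph edges) with hr1
      have hrw : dfsNbrs (f + 1) (v :: rest) vis (buildGraph edges) =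
          dfsNbrs (f + 1) rest r1 (buildGraph edges) := by
        rw [hr1]; simp only [dfsNbrs]
      have h1 : (∃ t, r1 = vis ++ t) ∧ r1.Nodup ∧ (∀ x ∈ r1, x ∈ nodesOf edges) ∧
          v ∈ r1 ∧ (∀ x ∈ r1, x ∈ vis ∨ ReachE edges v x) ∧
          (∀ x ∈ r1, x ∉ vis → ∀ y, AdjE edges x y → y ∈ r1) := by
        by_cases hv : v ∈ vis
        · rw [hr1, if_pos ((PySem.Set.contains_iff _ _).mpr hv)]
          exact ⟨⟨[], by simp⟩, hnd, hsub, hv, fun x hx => Or.inl hx,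
            fun x hx hnv => absurd hx hnv⟩
        · rw [hr1, if_neg (fun h => hv ((PySem.Set.contains_iff _ _).mp h))]
          exact hP v vis hnd hsub (hl v List.mem_cons_self) hlen
      obtain ⟨⟨t1, ht1⟩, h1nd, h1sub, h1v, h1sound, h1closed⟩ := h1
      have hlen1 : (nodesOf edges).length < (f + 1) + r1.length := by
        have : vis.length ≤ r1.length := by rw [ht1]; simp
        omega
      obtain ⟨⟨t2, ht2⟩, h2nd, h2sub, h2all, h2sound, h2closed⟩ :=
        ihl r1 h1nd h1sub (fun v' hv' => hl v' (List.mem_cons_of_mem _ hv')) hlen1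
      rw [hrw]
      refine ⟨⟨t1 ++ t2, by rw [ht2, ht1, List.append_assoc]⟩, h2nd, h2sub, ?_, ?_, ?_⟩
      · intro v' hv'
        rcases List.mem_cons.mp hv' with rfl | hv'
        · rw [ht2]; exact List.mem_append_left _ h1v
        · exact h2all v' hv'
      · intro x hx
        rcases h2sound x hx with hxr1 | ⟨v', hv', hvr⟩
        · rcases h1sound x hxr1 with h | h
          · exact Or.inl h
          · exact Or.inr ⟨v, List.mem_cons_self, h⟩
        · exact Or.inr ⟨v', List.mem_cons_of_mem _ hv', hvr⟩
      · intro x hx hxnv y hy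
        by_cases hxr1 : x ∈ r1
        · have : y ∈ r1 := h1closed x hxr1 hxnv y hy
          rw [ht2]
          exact List.mem_append_left _ this
        · exact h2closed x hx hxr1 y hy


theorem visited_charac (edges : List (Int × Int)) :
    (∀ x, x ∈ dfsF (2 * edges.length + 2) 0 PySem.Set.empty (buildGraph edges) ↔ ReachE edges 0 x) ∧
    (dfsF (2 * edges.length + 2) 0 PySem.Set.empty (buildGraph edges)).Nodup := by
  obtain ⟨hF, _⟩ := dfs_main edges (2 * edges.length + 2)
  have hlen : (nodesOf edges).length < (2 * edges.length + 2) + (PySem.Set.empty : PySem.Set Int).length := by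
    have := length_nodesOf_le edges
    simp only [PySem.Set.empty, List.length_nil]
    omega
  obtain ⟨⟨t, ht⟩, hnd, _hall, h0, hsound, hclosed⟩ :=
    hF 0 PySem.Set.empty List.nodup_nil (by simp [PySem.Set.empty])
      (zero_mem_nodesOf edges) hlen
  refine ⟨fun x => ⟨?_, ?_⟩, hnd⟩
  · intro hx
    rcases hsound x hx with h | h
    · simp [PySem.Set.empty] at h
    · exact h
  · intro hreach
    induction hreach with
    | refl => exact h0
    | tail hab hbc ihr =>
      exact hclosed _ ihr (by simp [PySem.Set.empty]) _ hbc

-- ===== B-side lemmas =====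
theorem set_add_append (c : PySem.Set Int) (x : Int) : ∃ t, PySem.Set.add c x = c ++ t := by
  rw [PySem.Set.add_eq_ite]; split_ifs
  · exact ⟨[], by simp⟩
  · exact ⟨[x], rfl⟩

theorem set_add_eq_mem {c : PySem.Set Int} {x : Int} (h : PySem.Set.add c x = c) : x ∈ c := by
  by_cases hx : x ∈ c
  · exact hx
  · rw [PySem.Set.add_of_not_mem hx] at h
    have := congrArg List.length h
    simp at this

theorem propStep_append (c : PySem.Set Int) (e : Int × Int) : ∃ t, propStep c e = c ++ t := by
  unfold propStep; split_ifs
  · exact set_add_append c e.2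
  · exact set_add_append c e.1
  · exact ⟨[], by simp⟩

theorem propStep_nodup {c : PySem.Set Int} (e : Int × Int) (h : c.Nodup) : (propStep c e).Nodup := by
  unfold propStep; split_ifs
  · exact PySem.Set.nodup_add _ _ h
  · exact PySem.Set.nodup_add _ _ h
  · exact h

theorem mem_propStep {c : PySem.Set Int} {e : Int × Int} {x : Int} (h : x ∈ propStep c e) :
    x ∈ c ∨ (x = e.2 ∧ e.1 ∈ c) ∨ (x = e.1 ∧ e.2 ∈ c) := by
  unfold propStep at h
  split_ifs at h with h1 h2
  · rw [PySem.Set.mem_add] at h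
    rcases h with h | h
    · exact Or.inl h
    · exact Or.inr (Or.inl ⟨h, (PySem.Set.contains_iff _ _).mp h1⟩)
  · rw [PySem.Set.mem_add] at h
    rcases h with h | h
    · exact Or.inl h
    · exact Or.inr (Or.inr ⟨h, (PySem.Set.contains_iff _ _).mp h2⟩)
  · exact Or.inl h

theorem propPass_append (l : List (Int × Int)) (c : PySem.Set Int) : ∃ t, propPass c l = c ++ t := by
  induction l generalizing c with
  | nil => exact ⟨[], by simp [propPass]⟩
  | cons e l ih =>
    obtain ⟨t1, h1⟩ := propStep_append c e
    obtain ⟨t2, h2⟩ := ih (propStep c e)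
    refine ⟨t1 ++ t2, ?_⟩
    show propPass (propStep c e) l = c ++ (t1 ++ t2)
    rw [h2, h1, List.append_assoc]

theorem propPass_nodup (l : List (Int × Int)) (c : PySem.Set Int) (h : c.Nodup) : (propPass c l).Nodup := by
  induction l generalizing c with
  | nil => exact h
  | cons e l ih => exact ih (propStep c e) (propStep_nodup e h)

theorem mem_propPass {l : List (Int × Int)} {c : PySem.Set Int} {x : Int} (h : x ∈ propPass c l) :
    x ∈ c ∨ ∃ e ∈ l, x = e.1 ∨ x = e.2 := by
  induction l generalizing c with
  | nil => exact Or.inl h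
  | cons e l ih =>
    rcases ih (c := propStep c e) h with h' | ⟨e', he', hx⟩
    · rcases mem_propStep h' with h'' | ⟨rfl, _⟩ | ⟨rfl, _⟩
      · exact Or.inl h''
      · exact Or.inr ⟨e, by simp⟩
      · exact Or.inr ⟨e, by simp⟩
    · exact Or.inr ⟨e', by simp [he'], hx⟩

theorem propPass_subset {edges l : List (Int × Int)} (hl : ∀ e ∈ l, e ∈ edges)
    (c : PySem.Set Int) (hc : ∀ x ∈ c, x ∈ nodesOf edges) :
    ∀ x ∈ propPass c l, x ∈ nodesOf edges := by
  intro x hx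
  rcases mem_propPass hx with h | ⟨e, he, h⟩
  · exact hc x h
  · have hadj : AdjE edges e.1 e.2 := Or.inl (by simpa using hl e he)
    rcases h with rfl | rfl
    · exact (adjE_mem_nodesOf hadj).1
    · exact (adjE_mem_nodesOf hadj).2

theorem propPass_sound {edges l : List (Int × Int)} (hl : ∀ e ∈ l, e ∈ edges)
    (c : PySem.Set Int) (hc : ∀ x ∈ c, ReachE edges 0 x) :
    ∀ x ∈ propPass c l, ReachE edges 0 x := by
  induction l generalizing c with
  | nil => exact hc
  | cons e l ih =>
    intro x hx
    refine ih (fun e' he' => hl e' (List.mem_cons_of_mem _ he')) (propStep c e) ?_ x hx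
    intro y hy
    have he : e ∈ edges := hl e (List.mem_cons_self)
    rcases mem_propStep hy with h | ⟨rfl, h1⟩ | ⟨rfl, h2⟩
    · exact hc y h
    · exact Relation.ReflTransGen.tail (hc e.1 h1) (Or.inl (by simpa using he))
    · exact Relation.ReflTransGen.tail (hc e.2 h2) (Or.inr (by simpa using he))

theorem propPass_of_mem {l : List (Int × Int)} {c : PySem.Set Int}
    (h : ∀ e ∈ l, e.1 ∈ c ∧ e.2 ∈ c) : propPass c l = c := by
  induction l with
  | nil => rfl
  | cons e l ih =>
    have hstep : propStep c e = c := by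
      unfold propStep
      rw [if_pos ((PySem.Set.contains_iff _ _).mpr (h e List.mem_cons_self).1)]
      exact PySem.Set.add_of_mem (h e List.mem_cons_self).2
    show propPass (propStep c e) l = c
    rw [hstep]
    exact ih (fun e' he' => h e' (List.mem_cons_of_mem _ he'))

theorem fixpoint_closed {l : List (Int × Int)} {c : PySem.Set Int} (hfix : propPass c l = c) :
    ∀ e ∈ l, (e.1 ∈ c → e.2 ∈ c) ∧ (e.2 ∈ c → e.1 ∈ c) := by
  induction l with
  | nil => intro e he; cases he
  | cons e l ih =>
    obtain ⟨t1, h1⟩ := propStep_append c e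
    obtain ⟨t2, h2⟩ := propPass_append l (propStep c e)
    have hchain : propPass (propStep c e) l = c := hfix
    rw [h1] at hchain h2
    rw [hchain] at h2
    have hlen : t1 = [] ∧ t2 = [] := by
      have hl2 := congrArg List.length h2
      simp only [List.length_append] at hl2
      exact ⟨List.eq_nil_of_length_eq_zero (by omega),
        List.eq_nil_of_length_eq_zero (by omega)⟩
    have hstep : propStep c e = c := by rw [h1, hlen.1, List.append_nil]
    have hrest : propPass c l = c := by
      rw [hlen.1, List.append_nil] at hchain
      exact hchain
    intro e' he'
    rcases List.mem_cons.mp he' with rfl | he'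
    · unfold propStep at hstep
      split_ifs at hstep with hc1 hc2
      · have h2m : e'.2 ∈ c := set_add_eq_mem hstep
        exact ⟨fun _ => h2m, fun _ => (PySem.Set.contains_iff _ _).mp hc1⟩
      · have h1m : e'.1 ∈ c := set_add_eq_mem hstep
        exact ⟨fun _ => (PySem.Set.contains_iff _ _).mp hc2, fun _ => h1m⟩
      · refine ⟨fun h => absurd ((PySem.Set.contains_iff _ _).mpr h) (by simpa using hc1),
          fun h => absurd ((PySem.Set.contains_iff _ _).mpr h) (by simpa using hc2)⟩
    · exact ih hrest e' he'

theorem satLoop_main (edges : List (Int × Int)) (f : Nat) :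
    ∀ (c : PySem.Set Int), c.Nodup → (∀ x ∈ c, x ∈ nodesOf edges) →
      (nodesOf edges).length ≤ f + c.length →
      (∃ t, satLoop f c edges = c ++ t) ∧ (satLoop f c edges).Nodup ∧
      (∀ x ∈ satLoop f c edges, x ∈ nodesOf edges) ∧
      propPass (satLoop f c edges) edges = satLoop f c edges := by
  induction f with
  | zero =>
    intro c hnd hsub hlen
    have hN : ∀ x ∈ nodesOf edges, x ∈ c := subset_of_nodup_le hnd hsub (by omega)
    have hfix : propPass c edges = c := by
      apply propPass_of_mem
      intro e he
      have hadj : AdjE edges e.1 e.2 := Or.inl (by simpa using he)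
      exact ⟨hN _ (adjE_mem_nodesOf hadj).1, hN _ (adjE_mem_nodesOf hadj).2⟩
    exact ⟨⟨[], by simp [satLoop]⟩, hnd, hsub, by simpa [satLoop] using hfix⟩
  | succ f ih =>
    intro c hnd hsub hlen
    obtain ⟨t0, ht0⟩ := propPass_append edges c
    by_cases hgrow : c.length < (propPass c edges).length
    · have hres : satLoop (f + 1) c edges = satLoop f (propPass c edges) edges := by
        simp only [satLoop, if_pos hgrow]
      obtain ⟨⟨t, ht⟩, hnd', hsub', hfix'⟩ := ih (propPass c edges)
        (propPass_nodup edges c hnd)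
        (propPass_subset (fun e he => he) c hsub)
        (by omega)
      rw [hres]
      exact ⟨⟨t0 ++ t, by rw [ht, ht0, List.append_assoc]⟩, hnd', hsub', hfix'⟩
    · have hres : satLoop (f + 1) c edges = propPass c edges := by
        simp only [satLoop, if_neg hgrow]
      have ht0nil : t0 = [] := by
        have := congrArg List.length ht0
        simp at this
        exact List.eq_nil_of_length_eq_zero (by omega)
      have hcc : propPass c edges = c := by rw [ht0, ht0nil, List.append_nil]
      rw [hres, hcc]
      exact ⟨⟨[], by simp⟩, hnd, hsub, hcc⟩

theorem satLoop_sound (edges : List (Int × Int)) (f : Nat) (c : PySem.Set Int)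
    (hc : ∀ x ∈ c, ReachE edges 0 x) : ∀ x ∈ satLoop f c edges, ReachE edges 0 x := by
  induction f generalizing c with
  | zero => exact hc
  | succ f ih =>
    have hp := propPass_sound (fun e he => he) c hc
    by_cases hgrow : c.length < (propPass c edges).length
    · simpa only [satLoop, if_pos hgrow] using ih (propPass c edges) hp
    · simpa only [satLoop, if_neg hgrow] using hp

theorem comp_charac (edges : List (Int × Int)) :
    (∀ x, x ∈ satLoop (2 * edges.length + 1) (PySem.Set.ofList [0]) edges ↔ ReachE edges 0 x) ∧
    (satLoop (2 * edges.length + 1) (PySem.Set.ofList [0]) edges).Nodup := by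
  have hc0 : ∀ x ∈ PySem.Set.ofList [(0 : Int)], x ∈ nodesOf edges := by
    intro x hx
    rw [PySem.Set.mem_ofList] at hx
    simp only [List.mem_singleton] at hx
    subst hx
    exact zero_mem_nodesOf edges
  obtain ⟨⟨t, ht⟩, hnd, hsub, hfix⟩ := satLoop_main edges (2 * edges.length + 1)
    (PySem.Set.ofList [0]) (PySem.Set.nodup_ofList _) hc0
    (by have := length_nodesOf_le edges; simp [PySem.Set.ofList]; omega)
  refine ⟨fun x => ⟨?_, ?_⟩, hnd⟩
  · intro hx
    refine satLoop_sound edges _ _ ?_ x hx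
    intro y hy
    rw [PySem.Set.mem_ofList] at hy
    simp only [List.mem_singleton] at hy
    subst hy
    exact Relation.ReflTransGen.refl
  · intro hreach
    have h0 : (0 : Int) ∈ satLoop (2 * edges.length + 1) (PySem.Set.ofList [0]) edges := by
      rw [ht]
      exact List.mem_append_left _ (by rw [PySem.Set.mem_ofList]; simp)
    have hclosed := fixpoint_closed hfix
    induction hreach with
    | refl => exact h0
    | tail hab hbc ihr =>
      rcases hbc with hbc | hbc
      · exact (hclosed _ hbc).1 ihr
      · exact (hclosed _ hbc).2 ihr

-- ===== VERDICT (by name: the statement is the Claim_ definition above) =====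
theorem is_valid_tree_spec : Claim_equal_is_valid_tree := by
  intro n edges _dom
  unfold Spec_is_valid_tree is_valid_tree is_valid_tree_alt
  by_cases hg : (edges.length : Int) ≠ n - 1
  · simp [hg]
  · simp only [hg, if_false]
    obtain ⟨hA, hAnd⟩ := visited_charac edges
    obtain ⟨hB, hBnd⟩ := comp_charac edges
    have hperm : (dfsF (2 * edges.length + 2) 0 PySem.Set.empty (buildGraph edges)).Perm
        (satLoop (2 * edges.length + 1) (PySem.Set.ofList [0]) edges) := by
      rw [List.perm_ext_iff_of_nodup hAnd hBnd]
      intro a; rw [hA, hB]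
    rw [hperm.length_eq]
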